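-- pv_equiv track=rewrite | github.com/olivier-stasse/mfja_3rd_floor_gz | mfja_robot_control_config/launch/multi_robot_sim.launch.py | _resolve_selected_robots
-- ===== SOURCE A (Python) =====
-- def _robot_shortcuts(robot, index):
--     name = str(robot.get('name', '')).strip()
--     model = str(robot.get('model', '')).strip().lower()
--     shortcuts = {str(index), name.lower(), model}
--
--     if name:
--         base_name = name.lower().rstrip('0123456789').rstrip('_')
--         if base_name:
--             shortcuts.add(base_name)
--
--     if model.startswith('kuka_'):
--         shortcuts.add('kuka')
--     elif model.startswith('staubli_'):
--         shortcuts.add('staubli')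
--     elif model == 'yaskawa_hc10':
--         shortcuts.add('hc10')
--     elif model == 'yaskawa_hc10dt':
--         shortcuts.add('hc10dt')
--     elif model == 'tiago':
--         shortcuts.add('tiago')
--
--     return shortcuts
--
-- def _resolve_selected_robots(all_robots, selected_tokens, config_path):
--     exact_name_map = {}
--     selector_map = {}
--
--     for index, robot in enumerate(all_robots, start=1):
--         name = str(robot.get('name', '')).strip()
--         if not name:
--             raise RuntimeError(
--                 f'Robot entry #{index} in "{config_path}" is missing the "name" field.'
--             )
--
--         exact_name_map[name.lower()] = robot
--         for shortcut in _robot_shortcuts(robot, index):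
--             selector_map.setdefault(shortcut, []).append(robot)
--
--     resolved = []
--     seen = set()
--     missing = []
--     ambiguous = []
--
--     for token in selected_tokens:
--         normalized = token.lower()
--         candidates = []
--
--         if normalized in exact_name_map:
--             candidates = [exact_name_map[normalized]]
--         else:
--             candidates = selector_map.get(normalized, [])
--
--         if not candidates:
--             missing.append(token)
--             continue
--         if len(candidates) > 1:
--             ambiguous.append(
--                 f'{token} -> {", ".join(str(robot["name"]) for robot in candidates)}'
--             )
--             continue
--
--         robot_name = str(candidates[0]['name'])
--         if robot_name not in seen:
--             seen.add(robot_name)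
--             resolved.append(candidates[0])
--
--     if missing or ambiguous:
--         available = ', '.join(
--             f'{index}={robot["name"]}'
--             for index, robot in enumerate(all_robots, start=1)
--         ) or '(none)'
--         shortcut_help = 'kuka, staubli, hc10, hc10dt, tiago'
--         errors = []
--         if missing:
--             errors.append('Unknown selection(s): ' + ', '.join(missing))
--         if ambiguous:
--             errors.append('Ambiguous selection(s): ' + '; '.join(ambiguous))
--         errors.append(f'Available robots in "{config_path}": {available}')
--         errors.append(f'Useful shortcuts: {shortcut_help}, or use "all" or "none"')
--         raise RuntimeError('. '.join(errors))
--
--     return resolved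
-- ===== SOURCE B (Python) =====
-- def _robot_shortcuts(robot, index):
--     name = str(robot.get('name', '')).strip()
--     model = str(robot.get('model', '')).strip().lower()
--     shortcuts = {str(index), name.lower(), model}
--
--     if name:
--         base_name = name.lower().rstrip('0123456789').rstrip('_')
--         if base_name:
--             shortcuts.add(base_name)
--
--     if model.startswith('kuka_'):
--         shortcuts.add('kuka')
--     elif model.startswith('staubli_'):
--         shortcuts.add('staubli')
--     elif model == 'yaskawa_hc10':
--         shortcuts.add('hc10')
--     elif model == 'yaskawa_hc10dt':
--         shortcuts.add('hc10dt')
--     elif model == 'tiago':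
--         shortcuts.add('tiago')
--
--     return shortcuts
--
--
-- def _resolve_selected_robots(all_robots, selected_tokens, config_path):
--     for index, robot in enumerate(all_robots, start=1):
--         if not str(robot.get('name', '')).strip():
--             raise RuntimeError(
--                 f'Robot entry #{index} in "{config_path}" is missing the "name" field.'
--             )
--
--     resolved = []
--     seen = set()
--     missing = []
--     ambiguous = []
--
--     for token in selected_tokens:
--         normalized = token.lower()
--
--         # Exact name match takes precedence; otherwise collect every robot
--         # whose shortcut set contains the token.
--         exact = next(
--             (robot for robot in all_robots
--              if str(robot.get('name', '')).strip().lower() == normalized),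
--             None,
--         )
--         if exact is not None:
--             candidates = [exact]
--         else:
--             candidates = [
--                 robot
--                 for index, robot in enumerate(all_robots, start=1)
--                 if normalized in _robot_shortcuts(robot, index)
--             ]
--
--         if not candidates:
--             missing.append(token)
--             continue
--         if len(candidates) > 1:
--             ambiguous.append(
--                 f'{token} -> {", ".join(str(robot["name"]) for robot in candidates)}'
--             )
--             continue
--
--         robot_name = str(candidates[0]['name'])
--         if robot_name not in seen:
--             seen.add(robot_name)
--             resolved.append(candidates[0])
--
--     if missing or ambiguous:
--         available = ', '.join(
--             f'{index}={robot["name"]}'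
--             for index, robot in enumerate(all_robots, start=1)
--         ) or '(none)'
--         shortcut_help = 'kuka, staubli, hc10, hc10dt, tiago'
--         errors = []
--         if missing:
--             errors.append('Unknown selection(s): ' + ', '.join(missing))
--         if ambiguous:
--             errors.append('Ambiguous selection(s): ' + '; '.join(ambiguous))
--         errors.append(f'Available robots in "{config_path}": {available}')
--         errors.append(f'Useful shortcuts: {shortcut_help}, or use "all" or "none"')
--         raise RuntimeError('. '.join(errors))
--
--     return resolved
-- ===== Notes on version B (the rewrite author's own statement) =====
-- stated objective: alternative
-- what changed: B drops A's precomputed exact_name_map/selector_map and resolves each token by a direct scan of all_robots (first exact lowered-name match, otherwise the robots whose on-the-fly shortcut sets contain the token) after an up-front name-validation pass; Pre_ excludes lists with duplicate lowered robot names, on which A's dict-overwrite (last duplicate wins) is an accidental tie-break.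
import Mathlib
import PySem

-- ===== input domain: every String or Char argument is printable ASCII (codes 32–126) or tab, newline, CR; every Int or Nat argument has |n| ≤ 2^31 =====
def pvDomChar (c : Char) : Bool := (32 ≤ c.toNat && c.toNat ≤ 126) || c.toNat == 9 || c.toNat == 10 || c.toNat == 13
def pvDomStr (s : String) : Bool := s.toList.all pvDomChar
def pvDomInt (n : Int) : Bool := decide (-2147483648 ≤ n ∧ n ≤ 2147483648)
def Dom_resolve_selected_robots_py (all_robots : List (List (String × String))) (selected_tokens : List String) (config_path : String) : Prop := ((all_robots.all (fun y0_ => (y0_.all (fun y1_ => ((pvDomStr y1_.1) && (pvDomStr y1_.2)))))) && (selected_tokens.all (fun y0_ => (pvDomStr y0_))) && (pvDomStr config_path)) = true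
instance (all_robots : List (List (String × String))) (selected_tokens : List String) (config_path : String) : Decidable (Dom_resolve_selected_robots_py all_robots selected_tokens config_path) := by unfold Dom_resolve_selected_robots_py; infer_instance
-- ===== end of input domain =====

-- B replaces A's precomputed exact-name/selector maps by a direct per-token scan of all_robots
-- (an alternative decomposition, not claimed faster); agreement is about the RETURN value.

-- shared module helpers (_robot_shortcuts and the name/model field reads are the same Python
-- code in both Source A and Source B, so both ports use these helpers)

-- hand port of Python's str.rstrip(chars) (PySem has no chars-argument rstrip): exact — drops
-- the longest trailing run of characters that are members of `bad`.
def pvRstripChars (s : String) (bad : List Char) : String :=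
  String.ofList ((s.toList.reverse.dropWhile (fun c => bad.contains c)).reverse)

-- str(robot.get(k, '')) — robot is a Python dict built from the pair list
def pvGetStr (r : List (String × String)) (k : String) : String :=
  PySem.Dict.getD (PySem.Dict.ofList r) k ""

-- str(robot.get('name', '')).strip()
def pvStripName (r : List (String × String)) : String :=
  PySem.Str.strip (pvGetStr r "name")

-- str(robot.get('name', '')).strip().lower()
def pvLowName (r : List (String × String)) : String :=
  PySem.Str.lower (pvStripName r)

-- port of _robot_shortcuts (the set's iteration order is never observable in either program:
-- only membership and one append per distinct shortcut are used)
def robot_shortcuts_py (robot : List (String × String)) (index : Int) : PySem.Set String :=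
  let name := pvStripName robot
  let model := PySem.Str.lower (PySem.Str.strip (pvGetStr robot "model"))
  let s := PySem.Set.ofList [PySem.Int.toStr index, PySem.Str.lower name, model]
  let s :=
    if name ≠ "" then
      let base_name := pvRstripChars (pvRstripChars (PySem.Str.lower name)
        ['0','1','2','3','4','5','6','7','8','9']) ['_']
      if base_name ≠ "" then PySem.Set.add s base_name else s
    else s
  if PySem.Str.startswith model "kuka_" then PySem.Set.add s "kuka"
  else if PySem.Str.startswith model "staubli_" then PySem.Set.add s "staubli"
  else if model = "yaskawa_hc10" then PySem.Set.add s "hc10"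
  else if model = "yaskawa_hc10dt" then PySem.Set.add s "hc10dt"
  else if model = "tiago" then PySem.Set.add s "tiago"
  else s

-- the token-processing tail (missing/ambiguous/seen-dedup) — literally identical Python code in
-- Source A and Source B, so one shared helper; state = (resolved, seen, missing, ambiguous)
def pvSelectTail (candidates : List (List (String × String))) (token : String)
    (st : List (List (String × String)) × PySem.Set String × List String × List String) :
    List (List (String × String)) × PySem.Set String × List String × List String :=
  if candidates = [] then (st.1, st.2.1, st.2.2.1 ++ [token], st.2.2.2)
  else if 1 < candidates.length then
    (st.1, st.2.1, st.2.2.1,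
      st.2.2.2 ++ [token ++ " -> " ++
        PySem.Str.join ", " (candidates.map (fun r => pvGetStr r "name"))])
  else
    -- str(candidates[0]['name']): the key is present whenever the stripped name is nonempty,
    -- so the total getD form is exact on the admitted inputs
    let robot := candidates.headD []
    let robot_name := pvGetStr robot "name"
    if robot_name ∈ st.2.1 then st
    else (st.1 ++ [robot], PySem.Set.add st.2.1 robot_name, st.2.2.1, st.2.2.2)

-- ===== PORT A =====
-- the map-building loop; none = the RuntimeError for a missing name (outside Pre_)
def pvBuildA
    (st : Option (PySem.Dict String (List (String × String)) ×
                  PySem.Dict String (List (List (String × String)))))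
    (ir : Int × List (String × String)) :
    Option (PySem.Dict String (List (String × String)) ×
            PySem.Dict String (List (List (String × String)))) :=
  match st with
  | none => none
  | some (em, sm) =>
    let name := pvStripName ir.2
    if name = "" then none
    else some (em.insert (PySem.Str.lower name) ir.2,
      (robot_shortcuts_py ir.2 ir.1).foldl
        (fun sm sc => PySem.Dict.modify sm sc [] (fun l => l ++ [ir.2])) sm)

-- the per-token step of A: lookup in the precomputed maps, then the shared tail
def pvTokStepA (em : PySem.Dict String (List (String × String)))
    (sm : PySem.Dict String (List (List (String × String))))
    (st : List (List (String × String)) × PySem.Set String × List String × List String)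
    (token : String) :
    List (List (String × String)) × PySem.Set String × List String × List String :=
  let normalized := PySem.Str.lower token
  let candidates : List (List (String × String)) :=
    match em.get? normalized with
    | some r => [r]
    | none => sm.getD normalized []
  pvSelectTail candidates token st

def resolve_selected_robots_py (all_robots : List (List (String × String))) (selected_tokens : List String) (config_path : String) : List (List (String × String)) :=
  match (PySem.List.enumerate all_robots 1).foldl pvBuildA
      (some (PySem.Dict.empty, PySem.Dict.empty)) with
  | none => []  -- raise RuntimeError('Robot entry #… is missing the "name" field.') — outside Pre_
  | some (em, sm) =>
    let fin := selected_tokens.foldl (pvTokStepA em sm) ([], PySem.Set.empty, [], [])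
    if fin.2.2.1 ≠ [] ∨ fin.2.2.2 ≠ [] then []  -- raise RuntimeError(…) — outside Pre_
    else fin.1

-- ===== PORT B =====
-- the per-token step of B: a direct scan of all_robots (first exact lowered-name match via
-- next(...), otherwise every robot whose on-the-fly shortcut set contains the token), then the
-- shared tail
def pvTokStepB (all_robots : List (List (String × String)))
    (st : List (List (String × String)) × PySem.Set String × List String × List String)
    (token : String) :
    List (List (String × String)) × PySem.Set String × List String × List String :=
  let normalized := PySem.Str.lower token
  let exact := all_robots.find? (fun r => pvLowName r = normalized)
  let candidates : List (List (String × String)) :=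
    match exact with
    | some r => [r]
    | none =>
      ((PySem.List.enumerate all_robots 1).filter
        (fun ir => decide (normalized ∈ robot_shortcuts_py ir.2 ir.1))).map (fun ir => ir.2)
  pvSelectTail candidates token st

def resolve_selected_robots_py_alt (all_robots : List (List (String × String))) (selected_tokens : List String) (config_path : String) : List (List (String × String)) :=
  if all_robots.any (fun r => pvStripName r = "") then []  -- validation pre-pass raise — outside Pre_
  else
    let fin := selected_tokens.foldl (pvTokStepB all_robots) ([], PySem.Set.empty, [], [])
    if fin.2.2.1 ≠ [] ∨ fin.2.2.2 ≠ [] then []  -- raise RuntimeError(…) — outside Pre_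
    else fin.1

-- ===== PRECONDITION & SPEC =====
-- Pre_ = the inputs where A returns (every robot has a nonempty stripped name and every token
-- resolves), minus one defensible corner: lists with duplicate lowered robot names are
-- excluded, because there A's exact match picks the LAST duplicate only through dict-key
-- overwrite — an accidental tie-break — while B's scan naturally picks the first.
def Pre_resolve_selected_robots_py (all_robots : List (List (String × String))) (selected_tokens : List String) (config_path : String) : Prop :=
  (∀ r ∈ all_robots, pvStripName r ≠ "") ∧
  List.Pairwise (fun a b => pvLowName a ≠ pvLowName b) all_robots ∧
  (∀ t ∈ selected_tokens,
    (∃ r ∈ all_robots, pvLowName r = PySem.Str.lower t) ∨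
    ((PySem.List.enumerate all_robots 1).countP
      (fun ir => decide (PySem.Str.lower t ∈ robot_shortcuts_py ir.2 ir.1)) = 1))
instance (all_robots : List (List (String × String))) (selected_tokens : List String) (config_path : String) : Decidable (Pre_resolve_selected_robots_py all_robots selected_tokens config_path) := by unfold Pre_resolve_selected_robots_py; infer_instance

def pvWitness_resolve_selected_robots_py : (List (List (String × String))) × List String × String :=
  ([[("name", "kuka1"), ("model", "kuka_kr6")], [("name", "tiago"), ("model", "tiago")]],
   ["KUKA1", "2"], "cfg.yaml")

def Spec_resolve_selected_robots_py (all_robots : List (List (String × String))) (selected_tokens : List String) (config_path : String) (out : List (List (String × String))) : Prop := out = resolve_selected_robots_py_alt all_robots selected_tokens config_path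
instance (all_robots : List (List (String × String))) (selected_tokens : List String) (config_path : String) (out : List (List (String × String))) : Decidable (Spec_resolve_selected_robots_py all_robots selected_tokens config_path out) := by unfold Spec_resolve_selected_robots_py; infer_instance

-- ===== CLAIM (what is proved, stated in full; the proofs are below) =====
def Claim_equal_resolve_selected_robots_py : Prop := ∀ (all_robots : List (List (String × String))) (selected_tokens : List String) (config_path : String), Dom_resolve_selected_robots_py all_robots selected_tokens config_path → Pre_resolve_selected_robots_py all_robots selected_tokens config_path → Spec_resolve_selected_robots_py all_robots selected_tokens config_path (resolve_selected_robots_py all_robots selected_tokens config_path)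

-- ===== LEMMAS AND PROOFS =====

-- A's last-match scan: the accumulator factors out
theorem pvLastM_acc (robots : List (List (String × String))) (n : String)
    (acc : Option (List (String × String))) :
    robots.foldl (fun acc r => if pvLowName r = n then some r else acc) acc =
      (robots.foldl (fun acc r => if pvLowName r = n then some r else acc) none).or acc := by
  induction robots generalizing acc with
  | nil => simp [List.foldl]
  | cons r rest ih =>
    simp only [List.foldl]
    rw [ih, ih (if pvLowName r = n then some r else none), Option.or_assoc]
    by_cases h : pvLowName r = n <;> simp [h]

-- A's exact_name_map lookup is a last-match scan
theorem pvExactMap (robots : List (List (String × String)))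
    (em : PySem.Dict String (List (String × String))) (n : String) :
    (robots.foldl (fun em r => em.insert (pvLowName r) r) em).get? n =
      (robots.foldl (fun acc r => if pvLowName r = n then some r else acc) none).or (em.get? n) := by
  induction robots generalizing em with
  | nil => simp [List.foldl]
  | cons r rest ih =>
    simp only [List.foldl]
    by_cases h : pvLowName r = n
    · subst h
      rw [ih, PySem.Dict.get?_insert_self, if_pos rfl, pvLastM_acc _ _ (some r)]
      simp only [Option.or_assoc, Option.some_or]
    · rw [ih, PySem.Dict.get?_insert_of_ne _ _ (fun hh => h hh.symm), if_neg h]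

-- no matching name ⇒ the last-match scan finds nothing
theorem pvLastM_eq_none (robots : List (List (String × String))) (n : String)
    (h : ∀ r ∈ robots, pvLowName r ≠ n) :
    robots.foldl (fun acc r => if pvLowName r = n then some r else acc) none = none := by
  induction robots with
  | nil => rfl
  | cons r rest ih =>
    simp only [List.foldl, h r (List.mem_cons_self ..), if_false]
    exact ih (fun x hx => h x (List.mem_cons_of_mem _ hx))

-- under pairwise-distinct lowered names, the last-match scan is B's first-match find?
theorem pvLastM_eq_find (robots : List (List (String × String))) (n : String)
    (hd : List.Pairwise (fun a b => pvLowName a ≠ pvLowName b) robots) :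
    robots.foldl (fun acc r => if pvLowName r = n then some r else acc) none =
      robots.find? (fun r => pvLowName r = n) := by
  induction robots with
  | nil => rfl
  | cons r rest ih =>
    rcases List.pairwise_cons.mp hd with ⟨hr, hrest⟩
    simp only [List.foldl, List.find?]
    by_cases h : pvLowName r = n
    · rw [pvLastM_acc, pvLastM_eq_none rest n
        (fun x hx => by rw [← h]; exact (hr x hx).symm)]
      simp [h]
    · rw [pvLastM_acc]
      simp only [h, decide_false, if_false, Option.or_none]
      exact ih hrest

theorem pvShortcuts_nodup (r : List (String × String)) (i : Int) :
    (robot_shortcuts_py r i).Nodup := by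
  simp only [robot_shortcuts_py]
  generalize hg : PySem.Set.ofList [PySem.Int.toStr i, PySem.Str.lower (pvStripName r),
    PySem.Str.lower (PySem.Str.strip (pvGetStr r "model"))] = s0
  have h0 : s0.Nodup := hg ▸ PySem.Set.nodup_ofList _
  split_ifs <;>
    repeat
      first
        | assumption
        | apply PySem.Set.nodup_add

-- one robot's contribution to selector_map
theorem pvSmStep (S : List String) (v : List (String × String)) :
    ∀ (sm : PySem.Dict String (List (List (String × String)))) (n : String), S.Nodup →
    (S.foldl (fun sm sc => PySem.Dict.modify sm sc [] (fun l => l ++ [v])) sm).getD n [] =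
      sm.getD n [] ++ (if n ∈ S then [v] else []) := by
  induction S with
  | nil => simp [List.foldl]
  | cons sc rest ih =>
    intro sm n hS
    rcases List.nodup_cons.mp hS with ⟨hni, hnd⟩
    simp only [List.foldl]
    rw [ih _ _ hnd]
    by_cases h : n = sc
    · subst h
      rw [PySem.Dict.getD_modify_self]
      simp [hni]
    · rw [PySem.Dict.getD_modify_of_ne _ _ _ h]
      simp [h, List.mem_cons]

-- the whole selector_map lookup is B's filter of the enumerated robots
theorem pvSmAll (L : List (Int × List (String × String)))
    (sm : PySem.Dict String (List (List (String × String)))) (n : String) :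
    (L.foldl (fun sm ir => (robot_shortcuts_py ir.2 ir.1).foldl
        (fun sm sc => PySem.Dict.modify sm sc [] (fun l => l ++ [ir.2])) sm) sm).getD n [] =
      sm.getD n [] ++
        (L.filter (fun ir => decide (n ∈ robot_shortcuts_py ir.2 ir.1))).map (fun ir => ir.2) := by
  induction L generalizing sm with
  | nil => simp [List.foldl]
  | cons ir rest ih =>
    simp only [List.foldl]
    rw [ih, pvSmStep _ _ _ _ (pvShortcuts_nodup ir.2 ir.1)]
    by_cases h : n ∈ robot_shortcuts_py ir.2 ir.1 <;> simp [h]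

-- the map-building fold splits into the two independent map folds when every name is nonempty
theorem pvBuildSplit (robots : List (List (String × String))) (i : Int)
    (em : PySem.Dict String (List (String × String)))
    (sm : PySem.Dict String (List (List (String × String))))
    (h : ∀ r ∈ robots, pvStripName r ≠ "") :
    (PySem.List.enumerate robots i).foldl pvBuildA (some (em, sm)) =
      some (robots.foldl (fun em r => em.insert (pvLowName r) r) em,
        (PySem.List.enumerate robots i).foldl (fun sm ir => (robot_shortcuts_py ir.2 ir.1).foldl
          (fun sm sc => PySem.Dict.modify sm sc [] (fun l => l ++ [ir.2])) sm) sm) := by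
  induction robots generalizing i em sm with
  | nil => simp [PySem.List.enumerate_nil, List.foldl]
  | cons r rest ih =>
    have hr : pvStripName r ≠ "" := h r (List.mem_cons_self ..)
    rw [PySem.List.enumerate_cons]
    simp only [List.foldl]
    rw [show pvBuildA (some (em, sm)) (i, r) =
        some (em.insert (pvLowName r) r,
          (robot_shortcuts_py r i).foldl
            (fun sm sc => PySem.Dict.modify sm sc [] (fun l => l ++ [r])) sm) by
      simp [pvBuildA, hr, pvLowName]]
    exact ih _ _ _ (fun x hx => h x (List.mem_cons_of_mem _ hx))

-- the token loop: equal states, and missing/ambiguous stay empty, under the Pre_ token condition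
theorem pvLoopEq (all_robots : List (List (String × String)))
    (em : PySem.Dict String (List (String × String)))
    (sm : PySem.Dict String (List (List (String × String))))
    (hem : ∀ n, em.get? n = all_robots.find? (fun r => pvLowName r = n))
    (hsm : ∀ n, sm.getD n [] =
      ((PySem.List.enumerate all_robots 1).filter
        (fun ir => decide (n ∈ robot_shortcuts_py ir.2 ir.1))).map (fun ir => ir.2))
    (tokens : List String)
    (htok : ∀ t ∈ tokens,
      (∃ r ∈ all_robots, pvLowName r = PySem.Str.lower t) ∨
      ((PySem.List.enumerate all_robots 1).countP
        (fun ir => decide (PySem.Str.lower t ∈ robot_shortcuts_py ir.2 ir.1)) = 1)) :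
    ∀ res seen,
      tokens.foldl (pvTokStepA em sm) (res, seen, [], []) =
        tokens.foldl (pvTokStepB all_robots) (res, seen, [], []) ∧
      (tokens.foldl (pvTokStepA em sm) (res, seen, [], [])).2.2.1 = [] ∧
      (tokens.foldl (pvTokStepA em sm) (res, seen, [], [])).2.2.2 = [] := by
  induction tokens with
  | nil => intro res seen; exact ⟨rfl, rfl, rfl⟩
  | cons t rest ih =>
    intro res seen
    have ht := htok t (List.mem_cons_self ..)
    have htr : ∀ t' ∈ rest, _ := fun t' h' => htok t' (List.mem_cons_of_mem _ h')
    -- the two candidate lists coincide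
    have hcand : (match em.get? (PySem.Str.lower t) with
        | some r => [r]
        | none => sm.getD (PySem.Str.lower t) []) =
        (match all_robots.find? (fun r => pvLowName r = PySem.Str.lower t) with
        | some r => [r]
        | none => ((PySem.List.enumerate all_robots 1).filter
            (fun ir => decide (PySem.Str.lower t ∈ robot_shortcuts_py ir.2 ir.1))).map
              (fun ir => ir.2)) := by
      rw [hem, hsm]
    have hstep : pvTokStepA em sm (res, seen, [], []) t =
        pvTokStepB all_robots (res, seen, [], []) t := by
      simp only [pvTokStepA, pvTokStepB]
      rw [hcand]
    -- the shared tail never touches missing/ambiguous on a singleton candidate list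
    have hone : ∃ c, (match all_robots.find? (fun r => pvLowName r = PySem.Str.lower t) with
        | some r => [r]
        | none => ((PySem.List.enumerate all_robots 1).filter
            (fun ir => decide (PySem.Str.lower t ∈ robot_shortcuts_py ir.2 ir.1))).map
              (fun ir => ir.2)) = [c] := by
      cases hm : all_robots.find? (fun r => pvLowName r = PySem.Str.lower t) with
      | some r => exact ⟨r, rfl⟩
      | none =>
        have hnomatch : ∀ r ∈ all_robots, pvLowName r ≠ PySem.Str.lower t := by
          intro r hr hc
          have := List.find?_eq_none.mp hm r hr
          simp [hc] at this
        have hcnt : (PySem.List.enumerate all_robots 1).countP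
            (fun ir => decide (PySem.Str.lower t ∈ robot_shortcuts_py ir.2 ir.1)) = 1 := by
          rcases ht with ⟨r, hr, hlow⟩ | hc
          · exact absurd hlow (hnomatch r hr)
          · exact hc
        rw [List.countP_eq_length_filter] at hcnt
        rcases List.length_eq_one_iff.mp hcnt with ⟨ir, hir⟩
        exact ⟨ir.2, by simp [hir]⟩
    rcases hone with ⟨c, hc⟩
    have hA : pvTokStepA em sm (res, seen, [], []) t =
        (if pvGetStr c "name" ∈ seen then (res, seen, ([] : List String), ([] : List String))
         else (res ++ [c], PySem.Set.add seen (pvGetStr c "name"), [], [])) := by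
      simp only [pvTokStepA]
      rw [hcand, hc]
      simp [pvSelectTail]
    simp only [List.foldl]
    rw [hstep.symm, hA]
    by_cases hs : pvGetStr c "name" ∈ seen <;> simp only [hs, if_true, if_false] <;>
      exact ih htr _ _

-- ===== VERDICT (by name: the statement is the Claim_ definition above) =====
theorem resolve_selected_robots_py_spec : Claim_equal_resolve_selected_robots_py := by
  intro all_robots selected_tokens config_path _ hpre
  rcases hpre with ⟨hname, hdist, htok⟩
  unfold Spec_resolve_selected_robots_py
  unfold resolve_selected_robots_py resolve_selected_robots_py_alt
  rw [pvBuildSplit all_robots 1 PySem.Dict.empty PySem.Dict.empty hname]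
  have hany : all_robots.any (fun r => pvStripName r = "") = false := by
    simp only [List.any_eq_false]
    intro r hr
    simp [hname r hr]
  rw [hany]
  simp only [Bool.false_eq_true, if_false]
  have hem : ∀ n, (all_robots.foldl (fun em r => em.insert (pvLowName r) r)
      PySem.Dict.empty).get? n = all_robots.find? (fun r => pvLowName r = n) := by
    intro n
    rw [pvExactMap, PySem.Dict.get?_empty, Option.or_none, pvLastM_eq_find _ _ hdist]
  have hsm : ∀ n, ((PySem.List.enumerate all_robots 1).foldl
      (fun sm ir => (robot_shortcuts_py ir.2 ir.1).foldl
        (fun sm sc => PySem.Dict.modify sm sc [] (fun l => l ++ [ir.2])) sm)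
      PySem.Dict.empty).getD n [] =
      ((PySem.List.enumerate all_robots 1).filter
        (fun ir => decide (n ∈ robot_shortcuts_py ir.2 ir.1))).map (fun ir => ir.2) := by
    intro n
    rw [pvSmAll]
    simp [PySem.Dict.getD, PySem.Dict.get?_empty]
  rcases pvLoopEq all_robots _ _ hem hsm selected_tokens htok [] PySem.Set.empty with
    ⟨heq, -, -⟩
  rw [← heq]
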